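-- pv_equiv track=rewrite | github.com/ogilg/Preferences | src/probes/data_loading.py | filter_task_ids_by_datasets
-- ===== SOURCE A (Python) =====
-- def filter_task_ids_by_datasets(
--     task_ids: set[str],
--     datasets: list[str] | None,
--     origins_cache: dict[str, set[str]],
-- ) -> set[str]:
--     """Filter task IDs to only those in specified datasets. Returns all if datasets is None."""
--     if not datasets:
--         return task_ids
--     target_ids = set()
--     for dataset in datasets:
--         target_ids.update(origins_cache.get(dataset.upper(), set()))
--     return task_ids & target_ids
-- ===== SOURCE B (Python) =====
-- def _hits(tid, keys, origins_cache):
--     for key in keys: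
--         if tid in origins_cache.get(key, set()):
--             return True
--     return False
--
--
-- def filter_task_ids_by_datasets(
--     task_ids: set[str],
--     datasets: list[str] | None,
--     origins_cache: dict[str, set[str]],
-- ) -> set[str]:
--     """Filter task IDs to only those in specified datasets. Returns all if datasets is None."""
--     if not datasets:
--         return task_ids
--     keys = [d.upper() for d in datasets]
--     result = set()
--     for tid in task_ids:
--         if _hits(tid, keys, origins_cache):
--             result.add(tid)
--     return result
-- ===== Notes on version B (the rewrite author's own statement) =====
-- stated objective: alternative
-- what changed: Instead of building a union set of all selected datasets' ids and intersecting it with task_ids, B precomputes the uppercased keys once and scans task_ids directly, adding each id whose membership a recursive per-key check finds in some dataset's origin set; no union table is ever built.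
import Mathlib
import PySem

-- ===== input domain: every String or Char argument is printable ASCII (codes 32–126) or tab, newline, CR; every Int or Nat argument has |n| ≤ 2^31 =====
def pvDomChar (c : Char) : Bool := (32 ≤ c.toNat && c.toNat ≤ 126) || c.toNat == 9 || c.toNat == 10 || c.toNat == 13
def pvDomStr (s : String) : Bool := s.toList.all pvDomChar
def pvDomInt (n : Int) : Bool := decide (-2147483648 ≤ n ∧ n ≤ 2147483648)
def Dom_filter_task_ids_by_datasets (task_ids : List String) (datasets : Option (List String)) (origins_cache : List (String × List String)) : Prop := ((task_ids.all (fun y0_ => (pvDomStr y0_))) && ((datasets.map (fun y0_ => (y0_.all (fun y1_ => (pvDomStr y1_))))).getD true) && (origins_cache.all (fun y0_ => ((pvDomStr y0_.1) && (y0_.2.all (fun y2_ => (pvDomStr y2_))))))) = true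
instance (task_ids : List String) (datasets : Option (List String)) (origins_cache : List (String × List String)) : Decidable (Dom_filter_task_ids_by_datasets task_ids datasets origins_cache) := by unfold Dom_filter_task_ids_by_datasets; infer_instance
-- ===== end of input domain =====

-- B replaces A's union-then-intersect with a direct recursive scan of task_ids against precomputed
-- uppercased keys (alternative decomposition; same results, no union table).

-- ===== PORT A =====
-- Port of A: build the union of the selected datasets' origin sets, then intersect with task_ids.
def filter_task_ids_by_datasets (task_ids : List String) (datasets : Option (List String)) (origins_cache : List (String × List String)) : List String :=
  match datasets with
  | none => task_ids
  | some ds =>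
    if ds.isEmpty then task_ids
    else
      let target_ids := ds.foldl
        (fun acc d => PySem.Set.update acc (PySem.Dict.getD (PySem.Dict.mk origins_cache) (PySem.Str.upper d) []))
        PySem.Set.empty
      PySem.Set.inter task_ids target_ids

-- ===== PORT B =====
-- Port of B's _hits: first-match association lookup of one key, then try the next key.
def pvLookupB : List (String × List String) → String → List String
  | [], _ => []
  | (k, v) :: rest, key => if k == key then v else pvLookupB rest key

def pvHitsB (tid : String) (keys : List String) (origins_cache : List (String × List String)) : Bool :=
  match keys with
  | [] => false
  | key :: rest => if (pvLookupB origins_cache key).contains tid then true else pvHitsB tid rest origins_cache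

-- Port of B's main loop: accumulate into the result set each tid that hits some key.
def pvCollectB (origins_cache : List (String × List String)) (keys : List String) (acc : List String) : List String → List String
  | [] => acc
  | tid :: rest =>
    if pvHitsB tid keys origins_cache then pvCollectB origins_cache keys (PySem.Set.add acc tid) rest
    else pvCollectB origins_cache keys acc rest

def filter_task_ids_by_datasets_alt (task_ids : List String) (datasets : Option (List String)) (origins_cache : List (String × List String)) : List String :=
  match datasets with
  | none => task_ids
  | some [] => task_ids
  | some ds => pvCollectB origins_cache (ds.map PySem.Str.upper) PySem.Set.empty task_ids

-- ===== PRECONDITION & SPEC =====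
-- task_ids is a Python set, so its Lean encoding holds distinct elements; Pre_ states that.
def Pre_filter_task_ids_by_datasets (task_ids : List String) (datasets : Option (List String)) (origins_cache : List (String × List String)) : Prop :=
  task_ids.Nodup
instance (task_ids : List String) (datasets : Option (List String)) (origins_cache : List (String × List String)) : Decidable (Pre_filter_task_ids_by_datasets task_ids datasets origins_cache) := by unfold Pre_filter_task_ids_by_datasets; infer_instance

def pvWitness_filter_task_ids_by_datasets : List String × Option (List String) × (List (String × List String)) :=
  (["a", "b"], some ["ds1"], [("DS1", ["a", "z"])])

def Spec_filter_task_ids_by_datasets (task_ids : List String) (datasets : Option (List String)) (origins_cache : List (String × List String)) (out : List String) : Prop := out = filter_task_ids_by_datasets_alt task_ids datasets origins_cache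
instance (task_ids : List String) (datasets : Option (List String)) (origins_cache : List (String × List String)) (out : List String) : Decidable (Spec_filter_task_ids_by_datasets task_ids datasets origins_cache out) := by unfold Spec_filter_task_ids_by_datasets; infer_instance

-- ===== CLAIM (what is proved, stated in full; the proofs are below) =====
def Claim_equal_filter_task_ids_by_datasets : Prop := ∀ (task_ids : List String) (datasets : Option (List String)) (origins_cache : List (String × List String)), Dom_filter_task_ids_by_datasets task_ids datasets origins_cache → Pre_filter_task_ids_by_datasets task_ids datasets origins_cache → Spec_filter_task_ids_by_datasets task_ids datasets origins_cache (filter_task_ids_by_datasets task_ids datasets origins_cache)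

-- ===== LEMMAS AND PROOFS =====

lemma mem_fold_update (ds : List String) (oc : List (String × List String)) (acc : List String) (x : String) :
    x ∈ ds.foldl (fun acc d => PySem.Set.update acc (PySem.Dict.getD (PySem.Dict.mk oc) (PySem.Str.upper d) [])) acc ↔
      x ∈ acc ∨ ∃ d ∈ ds, x ∈ PySem.Dict.getD (PySem.Dict.mk oc) (PySem.Str.upper d) [] := by
  induction ds generalizing acc with
  | nil => simp
  | cons d ds ih =>
    simp only [List.foldl_cons, ih, PySem.Set.mem_update, List.mem_cons]
    constructor
    · rintro ((h | h) | ⟨d', hd', h⟩)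
      · exact Or.inl h
      · exact Or.inr ⟨d, Or.inl rfl, h⟩
      · exact Or.inr ⟨d', Or.inr hd', h⟩
    · rintro (h | ⟨d', (rfl | hd'), h⟩)
      · exact Or.inl (Or.inl h)
      · exact Or.inl (Or.inr h)
      · exact Or.inr ⟨d', hd', h⟩

lemma pvLookupB_eq_getD (oc : List (String × List String)) (key : String) :
    pvLookupB oc key = PySem.Dict.getD (PySem.Dict.mk oc) key [] := by
  induction oc with
  | nil => rfl
  | cons p rest ih =>
    obtain ⟨k, v⟩ := p
    rw [pvLookupB, PySem.Dict.getD_eq_get?_getD, PySem.Dict.get?_mk_cons]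
    by_cases h : (k == key) = true
    · simp [h]
    · simp [h, ih, PySem.Dict.getD_eq_get?_getD]

lemma pvHitsB_eq_any (tid : String) (keys : List String) (oc : List (String × List String)) :
    pvHitsB tid keys oc = keys.any (fun k => (pvLookupB oc k).contains tid) := by
  induction keys with
  | nil => rfl
  | cons k rest ih =>
    rw [pvHitsB, List.any_cons, ih]
    by_cases h : (pvLookupB oc k).contains tid <;> simp

lemma pvCollectB_eq_filter (oc : List (String × List String)) (keys : List String) :
    ∀ (ts acc : List String), (acc ++ ts).Nodup →
      pvCollectB oc keys acc ts = acc ++ ts.filter (fun t => pvHitsB t keys oc) := by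
  intro ts
  induction ts with
  | nil => intro acc _; simp [pvCollectB]
  | cons t rest ih =>
    intro acc hnd
    have ht : t ∉ acc := by
      intro h
      exact (List.disjoint_of_nodup_append hnd) h (List.mem_cons_self ..)
    have hnd' : ((acc ++ [t]) ++ rest).Nodup := by
      rw [List.append_assoc]; exact hnd
    have hnd'' : (acc ++ rest).Nodup :=
      hnd.sublist (List.Sublist.append_left (List.sublist_cons_self t rest) acc)
    rw [pvCollectB]
    by_cases h : pvHitsB t keys oc
    · rw [if_pos h, PySem.Set.add_of_not_mem ht, ih _ hnd']
      simp [h]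
    · rw [if_neg (by simpa using h), ih _ hnd'']
      simp [h]

-- ===== VERDICT (by name: the statement is the Claim_ definition above) =====
theorem filter_task_ids_by_datasets_spec : Claim_equal_filter_task_ids_by_datasets := by
  intro task_ids datasets origins_cache _ hpre
  unfold Spec_filter_task_ids_by_datasets filter_task_ids_by_datasets filter_task_ids_by_datasets_alt
  cases datasets with
  | none => rfl
  | some ds =>
    cases ds with
    | nil => simp
    | cons d ds =>
      simp only [List.isEmpty_cons, if_neg (by decide : ¬ (false = true))]
      rw [pvCollectB_eq_filter _ _ _ _ (by simpa using hpre)]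
      unfold PySem.Set.inter
      simp only [PySem.Set.empty, List.nil_append]
      apply List.filter_congr
      intro tid _
      rw [Bool.eq_iff_iff]
      simp only [PySem.Set.contains_iff, mem_fold_update, pvHitsB_eq_any, List.any_eq_true,
        List.mem_map, pvLookupB_eq_getD]
      constructor
      · rintro (h | ⟨d', hd', h⟩)
        · exact absurd h (by simp)
        · exact ⟨PySem.Str.upper d', ⟨d', hd', rfl⟩, by simpa using h⟩
      · rintro ⟨k, ⟨d', hd', rfl⟩, h⟩
        exact Or.inr ⟨d', hd', by simpa using h⟩
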